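-- pv_equiv track=rewrite | github.com/ZScomnet/Programmers | baekjoon/stack/stack_sequence.py | solution
-- ===== SOURCE A (Python) =====
-- def solution(sequence):
-- 	result = []
-- 	stack = []
-- 	for i in range(1,len(sequence)+1):
-- 		result.append('+')
-- 		stack.append(i)
-- 		while sequence[-1] == stack[-1]:
-- 			result.append('-')
-- 			stack.pop()
-- 			sequence.pop()
-- 			if len(sequence) == 0 or len(stack) == 0:
-- 				break
-- 	if len(sequence) != 0:
-- 		return ["NO"]
--
-- 	return result
-- ===== SOURCE B (Python) =====
-- def solution(sequence):
--     n = len(sequence)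
--     p = sequence[::-1]
--     if sorted(p) != list(range(1, n + 1)):
--         return ["NO"]
--     seen = set()
--     m = 0
--     for t in p:
--         if t < m and any(v not in seen for v in range(t + 1, m + 1)):
--             return ["NO"]
--         seen.add(t)
--         if t > m:
--             m = t
--     result = []
--     m = 0
--     for t in p:
--         if t > m:
--             result.extend('+' * (t - m))
--             m = t
--         result.append('-')
--     return result
-- ===== Notes on version B (the rewrite author's own statement) =====
-- stated objective: alternative
-- what changed: A simulates the stack with one push loop and a nested drain-while; B is stack-free and staged: it first checks by sorting that the reversed sequence is a permutation of 1..n, then validates each pop target against the set of already-popped values using a running maximum, then generates the '+'/'-' string from the running maximum alone.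
import Mathlib
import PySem

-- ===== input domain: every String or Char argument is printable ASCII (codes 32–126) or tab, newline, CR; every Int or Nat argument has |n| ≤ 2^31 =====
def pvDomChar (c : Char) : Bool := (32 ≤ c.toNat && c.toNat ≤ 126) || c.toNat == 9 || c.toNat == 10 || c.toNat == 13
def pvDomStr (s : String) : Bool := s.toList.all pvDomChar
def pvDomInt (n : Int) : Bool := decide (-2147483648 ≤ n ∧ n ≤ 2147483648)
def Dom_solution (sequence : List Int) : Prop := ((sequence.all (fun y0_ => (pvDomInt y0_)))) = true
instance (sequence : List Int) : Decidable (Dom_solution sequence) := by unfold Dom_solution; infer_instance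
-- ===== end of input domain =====

-- B replaces A's stack simulation by three stack-free staged passes (sort-based
-- permutation check, per-pop validation against the popped-set with a running max,
-- then generation of the operation string from the running max); objective:
-- alternative. Equivalence is about the RETURN value only: A drains matched
-- elements of `sequence` in place, B does not mutate its argument.


-- ===== PORT A =====
-- Inner `while sequence[-1] == stack[-1]` loop of A; the stack top is the list head.
-- The catch-all branch corresponds to states where Python's indexing would raise;
-- on states A actually reaches, stack and sequence are nonempty there.
def drainA (res : List String) (stack : List Int) (seq : List Int) :
    List String × List Int × List Int :=
  match stack, seq.getLast? with
  | s :: rest, some t =>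
    if t = s then
      let res' := res ++ ["-"]
      let seq' := seq.dropLast
      if seq' = [] ∨ rest = [] then (res', rest, seq')
      else drainA res' rest seq'
    else (res, s :: rest, seq)
  | _, _ => (res, stack, seq)

-- body of A's `for i in range(1, len(sequence)+1)` loop
def stepA (st : List String × List Int × List Int) (i : Int) :
    List String × List Int × List Int :=
  drainA (st.1 ++ ["+"]) (i :: st.2.1) st.2.2

def solution (sequence : List Int) : List String :=
  let st := (PySem.List.pyRange 1 ((sequence.length : Int) + 1) 1).foldl stepA ([], [], sequence)
  if st.2.2 ≠ [] then ["NO"] else st.1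

-- ===== PORT B =====
-- B's second pass (`for t in p: if t < m and any(...): return ["NO"] ...`)
def checkB (m : Int) (seen : PySem.Set Int) : List Int → Bool
  | [] => true
  | t :: rest =>
    if t < m ∧ ((PySem.List.pyRange (t + 1) (m + 1) 1).any
        (fun v => !(PySem.Set.contains seen v))) = true then false
    else checkB (if t > m then t else m) (PySem.Set.add seen t) rest

-- B's third pass (build `result` from the running maximum)
def buildB (m : Int) (res : List String) : List Int → List String
  | [] => res
  | t :: rest =>
    if t > m then buildB t (res ++ List.replicate (t - m).toNat "+" ++ ["-"]) rest
    else buildB m (res ++ ["-"]) rest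

def solution_alt (sequence : List Int) : List String :=
  let n : Int := sequence.length
  -- sequence[::-1]; step -1 ≠ 0, so slice? never returns none
  let p := (PySem.List.slice? sequence none none (-1)).getD []
  if PySem.List.sorted p (fun x => x) false ≠ PySem.List.pyRange 1 (n + 1) 1 then ["NO"]
  else if checkB 0 PySem.Set.empty p = false then ["NO"]
  else buildB 0 [] p

-- ===== PRECONDITION & SPEC =====
def Spec_solution (sequence : List Int) (out : List String) : Prop := out = solution_alt sequence
instance (sequence : List Int) (out : List String) : Decidable (Spec_solution sequence out) := by unfold Spec_solution; infer_instance

-- ===== CLAIM (what is proved, stated in full; the proofs are below) =====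
def Claim_equal_solution : Prop := ∀ (sequence : List Int), Dom_solution sequence → Spec_solution sequence (solution sequence)

-- ===== LEMMAS AND PROOFS =====

-- Reference small-step machine A is reduced to: pop the top when it matches the
-- current target, otherwise push the next counter value while ≤ n.
def U (n : Int) (seq : List Int) (counter : Int) (stack : List Int)
    (res : List String) : List String × List Int × List Int :=
  match h : seq.getLast? with
  | none => (res, stack, seq)
  | some t =>
    if stack.head? = some t then
      U n seq.dropLast counter stack.tail (res ++ ["-"])
    else if counter ≤ n then
      U n seq (counter + 1) (counter :: stack) (res ++ ["+"])
    else (res, stack, seq)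
  termination_by (seq.length, (n + 1 - counter).toNat)
  decreasing_by
  · have hne : seq ≠ [] := by intro hn; simp [hn] at h
    have := List.length_pos_of_ne_nil hne
    left
    simp [List.length_dropLast]
    omega
  · right; omega

-- stack the machine holds after consuming the targets `pre` (max M): the values
-- 1..M not yet popped, in decreasing order
def unpopped (M : Int) (pre : List Int) : List Int :=
  (PySem.List.pyRange M 0 (-1)).filter (fun v => decide (v ∉ pre))

theorem drain_absorb (n counter : Int) :
    ∀ stack seq res, U n seq counter stack res =
      U n (drainA res stack seq).2.2 counter (drainA res stack seq).2.1
        (drainA res stack seq).1 := by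
  intro stack seq res
  fun_induction drainA res stack seq with
  | case1 res s rest seq t res' seq' hstop =>
    rw [U]
    split
    · rename_i hnone; rw [t] at hnone; cases hnone
    · rename_i t' ht'; rw [t] at ht'
      injection ht' with ht'; subst ht'
      simp [res', seq']
  | case2 res s rest seq t res' seq' hstop ih =>
    rw [U]
    split
    · rename_i hnone; rw [t] at hnone; cases hnone
    · rename_i t' ht'; rw [t] at ht'
      injection ht' with ht'; subst ht'
      simpa using ih
  | case3 => rfl
  | case4 => rfl

theorem drain_E (res : List String) (stack seq : List Int) :
    ((drainA res stack seq).2.2.length : Int) - (drainA res stack seq).2.1.length =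
      (seq.length : Int) - stack.length := by
  fun_induction drainA res stack seq with
  | case1 res s rest hd t res' seq' hstop =>
    have hne : s ≠ [] := by intro hn; simp [hn] at t
    have := List.length_pos_of_ne_nil hne
    simp [seq', List.length_dropLast]
    omega
  | case2 res s rest hd t res' seq' hstop ih =>
    have hne : s ≠ [] := by intro hn; simp [hn] at t
    have := List.length_pos_of_ne_nil hne
    simp [seq', res', List.length_dropLast] at ih ⊢
    omega
  | case3 => simp
  | case4 => simp

theorem drain_D (res : List String) (stack seq : List Int) :
    (drainA res stack seq).2.2 = [] ∨ (drainA res stack seq).2.1 = [] ∨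
      (drainA res stack seq).2.1.head? ≠ (drainA res stack seq).2.2.getLast? := by
  fun_induction drainA res stack seq with
  | case1 res s rest hd t res' seq' hstop =>
    rcases hstop with h | h
    · exact Or.inl (by simpa [seq'] using h)
    · exact Or.inr (Or.inl h)
  | case2 res s rest hd t res' seq' hstop ih => simpa using ih
  | case3 res s rest hd t heq hcond =>
    right; right
    simp [heq]
    intro h
    exact hcond h.symm
  | case4 a b c hmm =>
    match a, hc : c.getLast? with
    | [], _ => exact Or.inr (Or.inl rfl)
    | s :: rest, none =>
      exact Or.inl (by simpa using hc)
    | s :: rest, some t => exact absurd (hmm s rest t rfl hc) not_false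

theorem A_eq_U (n : Int) : ∀ (k : Nat) (counter : Int) (stack seq : List Int) (res : List String),
    (n + 1 - counter).toNat = k →
    (seq.length : Int) + counter - 1 - stack.length = n →
    (seq = [] ∨ stack = [] ∨ stack.head? ≠ seq.getLast?) →
    counter ≤ n + 1 →
    (PySem.List.pyRange counter (n + 1) 1).foldl stepA (res, stack, seq) =
      U n seq counter stack res := by
  intro k
  induction k with
  | zero =>
    intro counter stack seq res hk hE hD hle
    have hc : counter = n + 1 := by omega
    have hrange : PySem.List.pyRange counter (n + 1) 1 = [] := by
      simp [hc]
    rw [hrange]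
    simp only [List.foldl_nil]
    rcases hD with h | h | h
    · subst h; rw [U]; rfl
    · subst h
      have : seq = [] := by
        have := hE
        simp [hc] at this
        exact List.eq_nil_of_length_eq_zero (by omega)
      subst this; rw [U]; rfl
    · rw [U]
      split
      · rfl
      · rename_i t ht
        rw [if_neg (by rw [ht] at h; exact h), if_neg (by omega)]
  | succ k ih =>
    intro counter stack seq res hk hE hD hle
    have hcn : counter ≤ n := by omega
    have hrange : PySem.List.pyRange counter (n + 1) 1 =
        counter :: PySem.List.pyRange (counter + 1) (n + 1) 1 :=
      PySem.List.pyRange_one_cons (by omega)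
    have hseq : seq ≠ [] := by
      intro h; subst h; simp at hE; omega
    obtain ⟨t, ht⟩ : ∃ t, seq.getLast? = some t := by
      cases hq : seq.getLast? with
      | none => exact absurd (by simpa using hq) hseq
      | some t => exact ⟨t, rfl⟩
    have hU : U n seq counter stack res =
        U n seq (counter + 1) (counter :: stack) (res ++ ["+"]) := by
      rw [U]
      split
      · rename_i hnone; rw [ht] at hnone; cases hnone
      · rename_i t' ht'; rw [ht] at ht'; injection ht' with ht'; subst ht'
        rw [if_neg, if_pos hcn]
        rcases hD with h | h | h
        · exact absurd h hseq
        · simp [h]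
        · rw [ht] at h; exact h
    rw [hrange, List.foldl_cons, hU]
    have hstep : stepA (res, stack, seq) counter =
        drainA (res ++ ["+"]) (counter :: stack) seq := rfl
    rw [hstep]
    set d := drainA (res ++ ["+"]) (counter :: stack) seq with hd
    have habs := drain_absorb n (counter + 1) (counter :: stack) seq (res ++ ["+"])
    rw [habs]
    have hE' := drain_E (res ++ ["+"]) (counter :: stack) seq
    have hD' := drain_D (res ++ ["+"]) (counter :: stack) seq
    have := ih (counter + 1) d.2.1 d.2.2 d.1 (by omega)
      (by rw [← hd] at hE'; simp at hE' ⊢; omega)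
      (by rw [← hd] at hD'; exact hD') (by omega)
    rw [← this]

theorem nopop (n : Int) : ∀ (k : Nat) (counter t : Int) (stack seq : List Int) (res : List String),
    (n + 1 - counter).toNat = k →
    seq.getLast? = some t → t < counter → stack.head? ≠ some t →
    (U n seq counter stack res).2.2 = seq := by
  intro k
  induction k with
  | zero =>
    intro counter t stack seq res hk ht hlt hh
    rw [U]
    split
    · rfl
    · rename_i t' ht'; rw [ht] at ht'; injection ht' with ht'; subst ht'
      rw [if_neg hh, if_neg (by omega)]
  | succ k ih =>
    intro counter t stack seq res hk ht hlt hh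
    rw [U]
    split
    · rfl
    · rename_i t' ht'; rw [ht] at ht'; injection ht' with ht'; subst ht'
      rw [if_neg hh]
      by_cases hcn : counter ≤ n
      · rw [if_pos hcn]
        exact ih (counter + 1) t (counter :: stack) seq (res ++ ["+"]) (by omega) ht (by omega)
          (by simp; omega)
      · rw [if_neg hcn]

-- `range(a, b, -1)` split at a midpoint
theorem pyRange_neg_one_append (a m b : Int) (h1 : b ≤ m) (h2 : m ≤ a) :
    PySem.List.pyRange a b (-1) =
      PySem.List.pyRange a m (-1) ++ PySem.List.pyRange m b (-1) := by
  rw [PySem.List.pyRange_neg_one_eq_reverse a b,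
    PySem.List.pyRange_one_append (b + 1) (m + 1) (a + 1) (by omega) (by omega),
    List.reverse_append, PySem.List.pyRange_neg_one_eq_reverse a m,
    PySem.List.pyRange_neg_one_eq_reverse m b]

theorem mem_unpopped (M : Int) (pre : List Int) (x : Int) :
    x ∈ unpopped M pre → 0 < x ∧ x ≤ M ∧ x ∉ pre := by
  intro h
  have := List.mem_filter.mp h
  rcases this with ⟨h1, h2⟩
  rw [PySem.List.mem_pyRange_neg_one] at h1
  exact ⟨h1.1, h1.2, by simpa using h2⟩

-- head of the machine stack characterised
theorem head_unpopped (pre : List Int) (M t : Int)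
    (h : (unpopped M pre).head? = some t) :
    1 ≤ t ∧ t ≤ M ∧ t ∉ pre ∧ ∀ v, t < v → v ≤ M → v ∈ pre := by
  by_cases hM : M ≤ 0
  · exfalso
    unfold unpopped at h
    rw [PySem.List.pyRange_neg_one_eq_nil hM] at h
    simp at h
  · -- strong induction on M.toNat
    induction hk : M.toNat generalizing M with
    | zero => omega
    | succ k ih =>
      unfold unpopped at h
      rw [PySem.List.pyRange_neg_one_cons (by omega : (0:Int) < M)] at h
      by_cases hMp : M ∈ pre
      · simp only [List.filter_cons, decide_eq_true_eq] at h
        rw [if_neg (by simp [hMp])] at h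
        by_cases hM1 : M - 1 ≤ 0
        · exfalso
          have : PySem.List.pyRange (M - 1) 0 (-1) = [] :=
            PySem.List.pyRange_neg_one_eq_nil hM1
          rw [this] at h; simp at h
        · have := ih (M - 1) h hM1 (by omega)
          exact ⟨this.1, by omega, this.2.2.1, by
            intro v hv1 hv2
            by_cases hvM : v = M
            · rw [hvM]; exact hMp
            · exact this.2.2.2 v hv1 (by omega)⟩
      · simp only [List.filter_cons, decide_eq_true_eq] at h
        rw [if_pos (by simp [hMp])] at h
        simp only [List.head?_cons, Option.some.injEq] at h
        subst h
        exact ⟨by omega, le_refl _, hMp, by intro v h1 h2; omega⟩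

theorem unpopped_cons (pre : List Int) (M t : Int) (h1 : 1 ≤ t) (h2 : t ≤ M)
    (h3 : t ∉ pre) (h4 : ∀ v, t < v → v ≤ M → v ∈ pre) :
    unpopped M pre = t :: unpopped M (pre ++ [t]) := by
  unfold unpopped
  rw [pyRange_neg_one_append M t 0 (by omega) h2]
  rw [PySem.List.pyRange_neg_one_cons (by omega : (0:Int) < t)]
  rw [List.filter_append, List.filter_append]
  have e1 : (PySem.List.pyRange M t (-1)).filter (fun v => decide (v ∉ pre)) = [] := by
    rw [List.filter_eq_nil_iff]
    intro v hv
    rw [PySem.List.mem_pyRange_neg_one] at hv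
    simp [h4 v hv.1 hv.2]
  have e2 : (PySem.List.pyRange M t (-1)).filter (fun v => decide (v ∉ pre ++ [t])) = [] := by
    rw [List.filter_eq_nil_iff]
    intro v hv
    rw [PySem.List.mem_pyRange_neg_one] at hv
    simp [h4 v hv.1 hv.2]
  rw [e1, e2]
  simp only [List.filter_cons, decide_eq_true_eq]
  rw [if_pos (by simp [h3]), if_neg (by simp)]
  simp only [List.nil_append, List.cons.injEq, true_and]
  apply List.filter_congr
  intro v hv
  rw [PySem.List.mem_pyRange_neg_one] at hv
  simp only [decide_eq_decide, List.mem_append, List.mem_singleton]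
  constructor
  · intro hnp h; rcases h with h | h
    · exact hnp h
    · omega
  · intro hnp h; exact hnp (Or.inl h)

theorem unpopped_push (pre : List Int) (M t : Int) (h0 : 0 ≤ M)
    (hM : ∀ x ∈ pre, x ≤ M) (ht : M < t) :
    unpopped t (pre ++ [t]) = PySem.List.pyRange (t - 1) M (-1) ++ unpopped M pre := by
  unfold unpopped
  rw [pyRange_neg_one_append t (t - 1) 0 (by omega) (by omega),
    pyRange_neg_one_append (t - 1) M 0 h0 (by omega)]
  have et : PySem.List.pyRange t (t - 1) (-1) = [t] := by
    rw [PySem.List.pyRange_neg_one_cons (by omega : t - 1 < t),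
      PySem.List.pyRange_neg_one_eq_nil (by omega)]
  rw [et, List.filter_append, List.filter_append]
  have e1 : ([t] : List Int).filter (fun v => decide (v ∉ pre ++ [t])) = [] := by simp
  have e2 : (PySem.List.pyRange (t - 1) M (-1)).filter (fun v => decide (v ∉ pre ++ [t])) =
      PySem.List.pyRange (t - 1) M (-1) := by
    rw [List.filter_eq_self]
    intro v hv
    rw [PySem.List.mem_pyRange_neg_one] at hv
    simp only [decide_eq_true_eq, List.mem_append, List.mem_singleton]
    intro h
    rcases h with h | h
    · exact absurd (hM v h) (by omega)
    · omega
  have e3 : (PySem.List.pyRange M 0 (-1)).filter (fun v => decide (v ∉ pre ++ [t])) =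
      (PySem.List.pyRange M 0 (-1)).filter (fun v => decide (v ∉ pre)) := by
    apply List.filter_congr
    intro v hv
    rw [PySem.List.mem_pyRange_neg_one] at hv
    simp only [decide_eq_decide, List.mem_append, List.mem_singleton]
    constructor
    · intro hnp h; exact hnp (Or.inl h)
    · intro hnp h; rcases h with h | h
      · exact hnp h
      · omega
  rw [e1, e2, e3, List.nil_append]

-- the machine pushes counter..t and pops t, when the target t is a new maximum
theorem push_phase (n : Int) : ∀ (k : Nat) (c t : Int) (st seq : List Int) (res : List String),
    (t - c).toNat = k → seq.getLast? = some t → c ≤ t → t ≤ n → (∀ x ∈ st, x < c) →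
    U n seq c st res =
      U n seq.dropLast (t + 1) (PySem.List.pyRange (t - 1) (c - 1) (-1) ++ st)
        (res ++ List.replicate (t - c + 1).toNat "+" ++ ["-"]) := by
  intro k
  induction k with
  | zero =>
    intro c t st seq res hk ht hct htn hst
    have hct' : c = t := by omega
    subst hct'
    rw [U]
    split
    · rename_i hnone; rw [ht] at hnone; cases hnone
    · rename_i t' ht'; rw [ht] at ht'; injection ht' with ht'; subst ht'
      have hhead : st.head? ≠ some c := by
        cases st with
        | nil => simp
        | cons a l =>
          have := hst a (by simp)
          simp only [List.head?_cons, ne_eq, Option.some.injEq]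
          omega
      rw [if_neg hhead, if_pos (by omega : c ≤ n)]
      rw [U]
      split
      · rename_i hnone; rw [ht] at hnone; cases hnone
      · rename_i t' ht'; rw [ht] at ht'; injection ht' with ht'; subst ht'
        rw [if_pos (by simp)]
        rw [PySem.List.pyRange_neg_one_eq_nil (by omega : c - 1 ≤ c - 1)]
        simp
  | succ k ih =>
    intro c t st seq res hk ht hct htn hst
    have hclt : c < t := by omega
    have hLHS : U n seq c st res = U n seq (c + 1) (c :: st) (res ++ ["+"]) := by
      rw [U]
      split
      · rename_i hnone; rw [ht] at hnone; cases hnone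
      · rename_i t' ht'; rw [ht] at ht'; injection ht' with ht'; subst ht'
        have hhead : st.head? ≠ some t := by
          cases st with
          | nil => simp
          | cons a l =>
            have := hst a (by simp)
            simp only [List.head?_cons, ne_eq, Option.some.injEq]
            omega
        rw [if_neg hhead, if_pos (by omega : c ≤ n)]
    have hih := ih (c + 1) t (c :: st) seq (res ++ ["+"]) (by omega) ht (by omega) htn
      (by intro x hx
          rcases List.mem_cons.mp hx with h | h
          · omega
          · have := hst x h; omega)
    have hstk : PySem.List.pyRange (t - 1) (c - 1) (-1) =
        PySem.List.pyRange (t - 1) c (-1) ++ [c] := by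
      rw [pyRange_neg_one_append (t - 1) c (c - 1) (by omega) (by omega)]
      congr 1
      rw [PySem.List.pyRange_neg_one_cons (by omega : c - 1 < c),
        PySem.List.pyRange_neg_one_eq_nil (by omega)]
    have hres : (t - c + 1).toNat = (t - c - 1 + 1).toNat + 1 := by omega
    rw [hLHS, hih, hstk, hres, List.replicate_succ]
    simp [show (t - (c + 1) + 1).toNat = (t - c).toNat from by omega]

-- a target above n can never be matched: the machine gets stuck
theorem overflow_stuck (n : Int) : ∀ (k : Nat) (c t : Int) (st seq : List Int) (res : List String),
    (n + 1 - c).toNat = k → seq.getLast? = some t → n < t → (∀ x ∈ st, x ≤ n) →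
    (U n seq c st res).2.2 = seq := by
  intro k
  induction k with
  | zero =>
    intro c t st seq res hk ht htn hst
    rw [U]
    split
    · rfl
    · rename_i t' ht'; rw [ht] at ht'; injection ht' with ht'; subst ht'
      have hhead : st.head? ≠ some t := by
        cases st with
        | nil => simp
        | cons a l =>
          have := hst a (by simp)
          simp only [List.head?_cons, ne_eq, Option.some.injEq]
          omega
      rw [if_neg hhead, if_neg (by omega)]
  | succ k ih =>
    intro c t st seq res hk ht htn hst
    rw [U]
    split
    · rfl
    · rename_i t' ht'; rw [ht] at ht'; injection ht' with ht'; subst ht'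
      have hhead : st.head? ≠ some t := by
        cases st with
        | nil => simp
        | cons a l =>
          have := hst a (by simp)
          simp only [List.head?_cons, ne_eq, Option.some.injEq]
          omega
      rw [if_neg hhead]
      by_cases hcn : c ≤ n
      · rw [if_pos hcn]
        exact ih (c + 1) t (c :: st) seq (res ++ ["+"]) (by omega) ht htn
          (by intro x hx
              rcases List.mem_cons.mp hx with h | h
              · omega
              · exact hst x h)
      · rw [if_neg hcn]

theorem rev_decomp (seq : List Int) (t : Int) (h : seq.getLast? = some t) :
    seq.reverse = t :: seq.dropLast.reverse ∧ t ∈ seq ∧ seq ≠ [] := by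
  obtain ⟨l', rfl⟩ := List.getLast?_eq_some_iff.mp h
  exact ⟨by simp, by simp, by simp⟩

-- completeness: when B's checks pass, the machine succeeds and produces B's string
theorem run_success (n : Int) : ∀ (m : Nat) (seq : List Int), seq.length = m →
    ∀ (pre : List Int) (M : Int) (res : List String),
    0 ≤ M → M ≤ n →
    (∀ x ∈ pre, 1 ≤ x ∧ x ≤ M) →
    (pre = [] → M = 0) → (pre ≠ [] → M ∈ pre) →
    (pre ++ seq.reverse).Nodup →
    (∀ x ∈ seq, 1 ≤ x ∧ x ≤ n) →
    checkB M (PySem.Set.ofList pre) seq.reverse = true →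
    (U n seq (M + 1) (unpopped M pre) res).2.2 = [] ∧
      (U n seq (M + 1) (unpopped M pre) res).1 = buildB M res seq.reverse := by
  intro m
  induction m using Nat.strong_induction_on with
  | _ m ihm =>
    intro seq hm pre M res hM0 hMn hpre hpre0 hpreM hnd hbnd hchk
    cases hlast : seq.getLast? with
    | none =>
      have hseq : seq = [] := by simpa using hlast
      subst hseq
      have hU : U n [] (M + 1) (unpopped M pre) res = (res, unpopped M pre, []) := by
        rw [U]; rfl
      simp [hU, buildB]
    | some t =>
      obtain ⟨hrev, htmem, hne⟩ := rev_decomp seq t hlast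
      have hbt := hbnd t htmem
      rw [hrev] at hchk hnd
      rw [checkB] at hchk
      by_cases hcond : (t < M ∧ ((PySem.List.pyRange (t + 1) (M + 1) 1).any
          (fun v => !(PySem.Set.contains (PySem.Set.ofList pre) v))) = true)
      · rw [if_pos hcond] at hchk; cases hchk
      · rw [if_neg hcond] at hchk
        have hlen : seq.dropLast.length < m := by
          have := List.length_pos_of_ne_nil hne
          simp [List.length_dropLast]; omega
        have hndrop : ∀ x ∈ seq.dropLast, x ∈ seq := fun x hx => List.mem_of_mem_dropLast hx
        by_cases htM : t > M
        · -- new maximum: the machine pushes M+1..t and pops t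
          have hpush := push_phase n (t - (M + 1)).toNat (M + 1) t (unpopped M pre) seq res
            rfl hlast (by omega) hbt.2
            (fun x hx => by have := mem_unpopped M pre x hx; omega)
          have hstk : PySem.List.pyRange (t - 1) (M + 1 - 1) (-1) ++ unpopped M pre =
              unpopped t (pre ++ [t]) := by
            rw [show M + 1 - 1 = M from by omega,
              ← unpopped_push pre M t hM0 (fun x hx => (hpre x hx).2) (by omega)]
          rw [hstk, show (t - (M + 1) + 1).toNat = (t - M).toNat from by omega] at hpush
          rw [hpush]
          rw [if_pos htM, ← PySem.Set.ofList_append_singleton] at hchk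
          have IH := ihm seq.dropLast.length hlen seq.dropLast rfl (pre ++ [t]) t
            (res ++ List.replicate (t - M).toNat "+" ++ ["-"])
            (by omega) (by omega)
            (by intro x hx
                rcases List.mem_append.mp hx with h | h
                · have := hpre x h; omega
                · simp at h; omega)
            (by simp) (by intro _; simp)
            (by simpa using hnd)
            (fun x hx => hbnd x (hndrop x hx))
            hchk
          refine ⟨IH.1, ?_⟩
          rw [IH.2, hrev]
          simp only [buildB]
          rw [if_pos htM]
        · -- old value: it must be the stack top, popped directly
          have h1t : 1 ≤ t := hbt.1
          have htpre : t ∉ pre := by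
            have hdis := List.disjoint_of_nodup_append hnd
            intro hc
            exact hdis hc (by simp)
          have htM' : t < M := by
            by_cases hp : pre = []
            · have := hpre0 hp; omega
            · have := hpreM hp
              have : t ≠ M := fun h => htpre (h ▸ this)
              omega
          have hall : ∀ v, t < v → v ≤ M → v ∈ pre := by
            intro v hv1 hv2
            by_contra hvn
            have hvmem : v ∈ PySem.List.pyRange (t + 1) (M + 1) 1 :=
              PySem.List.mem_pyRange_one.mpr ⟨by omega, by omega⟩
            have hcf : PySem.Set.contains (PySem.Set.ofList pre) v = false := by
              rw [← Bool.not_eq_true, PySem.Set.contains_iff]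
              simp [PySem.Set.mem_ofList, hvn]
            exact hcond ⟨htM', List.any_eq_true.mpr ⟨v, hvmem, by simpa using hvn⟩⟩
          have hcons := unpopped_cons pre M t h1t (by omega) htpre hall
          have hstep : U n seq (M + 1) (t :: unpopped M (pre ++ [t])) res =
              U n seq.dropLast (M + 1) (unpopped M (pre ++ [t])) (res ++ ["-"]) := by
            rw [U]
            split
            · rename_i hnone; rw [hlast] at hnone; cases hnone
            · rename_i t' ht'; rw [hlast] at ht'; injection ht' with ht'; subst ht'
              rw [if_pos (by simp)]
              simp
          rw [hcons, hstep]
          rw [if_neg (by omega), ← PySem.Set.ofList_append_singleton] at hchk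
          have IH := ihm seq.dropLast.length hlen seq.dropLast rfl (pre ++ [t]) M
            (res ++ ["-"]) hM0 hMn
            (by intro x hx
                rcases List.mem_append.mp hx with h | h
                · exact hpre x h
                · simp at h; omega)
            (by simp) (by intro _
                          have hp : pre ≠ [] := by
                            intro hp; have := hpre0 hp; omega
                          exact List.mem_append.mpr (Or.inl (hpreM hp)))
            (by simpa using hnd)
            (fun x hx => hbnd x (hndrop x hx))
            hchk
          refine ⟨IH.1, ?_⟩
          rw [IH.2, hrev]
          simp only [buildB]
          rw [if_neg (by omega)]

-- soundness: when the machine succeeds, B's checks pass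
theorem run_sound (n : Int) : ∀ (m : Nat) (seq : List Int), seq.length = m →
    ∀ (pre : List Int) (M : Int) (res : List String),
    0 ≤ M → M ≤ n →
    (∀ x ∈ pre, 1 ≤ x ∧ x ≤ M) →
    (pre = [] → M = 0) → (pre ≠ [] → M ∈ pre) →
    pre.Nodup →
    (U n seq (M + 1) (unpopped M pre) res).2.2 = [] →
    (∀ x ∈ seq, 1 ≤ x ∧ x ≤ n) ∧ (pre ++ seq.reverse).Nodup ∧
      checkB M (PySem.Set.ofList pre) seq.reverse = true := by
  intro m
  induction m using Nat.strong_induction_on with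
  | _ m ihm =>
    intro seq hm pre M res hM0 hMn hpre hpre0 hpreM hnd hrun
    cases hlast : seq.getLast? with
    | none =>
      have hseq : seq = [] := by simpa using hlast
      subst hseq
      exact ⟨by simp, by simpa using hnd, by rw [List.reverse_nil, checkB]⟩
    | some t =>
      obtain ⟨hrev, htmem, hne⟩ := rev_decomp seq t hlast
      have hlen : seq.dropLast.length < m := by
        have := List.length_pos_of_ne_nil hne
        simp [List.length_dropLast]; omega
      have hsplit : ∀ x ∈ seq, x ∈ seq.dropLast ∨ x = t := by
        obtain ⟨l', rfl⟩ := List.getLast?_eq_some_iff.mp hlast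
        intro x hx
        simp only [List.dropLast_concat]
        simpa using hx
      by_cases htn : n < t
      · -- a target above n: the machine can never match it
        exfalso
        have := overflow_stuck n (n + 1 - (M + 1)).toNat (M + 1) t (unpopped M pre) seq res
          rfl hlast htn (fun x hx => by have := mem_unpopped M pre x hx; omega)
        rw [this] at hrun
        exact hne hrun
      · by_cases htM : t > M
        · -- new maximum: the machine pushes M+1..t and pops t
          have hpush := push_phase n (t - (M + 1)).toNat (M + 1) t (unpopped M pre) seq res
            rfl hlast (by omega) (by omega)
            (fun x hx => by have := mem_unpopped M pre x hx; omega)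
          have hstk : PySem.List.pyRange (t - 1) (M + 1 - 1) (-1) ++ unpopped M pre =
              unpopped t (pre ++ [t]) := by
            rw [show M + 1 - 1 = M from by omega,
              ← unpopped_push pre M t hM0 (fun x hx => (hpre x hx).2) (by omega)]
          rw [hstk] at hpush
          rw [hpush] at hrun
          have IH := ihm seq.dropLast.length hlen seq.dropLast rfl (pre ++ [t]) t
            (res ++ List.replicate (t - (M + 1) + 1).toNat "+" ++ ["-"])
            (by omega) (by omega)
            (by intro x hx
                rcases List.mem_append.mp hx with h | h
                · have := hpre x h; omega
                · simp at h; omega)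
            (fun h => absurd h (by simp)) (by intro _; simp)
            (by have htpre : t ∉ pre := fun hc => by have := (hpre t hc).2; omega
                rw [List.nodup_append]
                exact ⟨hnd, List.nodup_singleton t,
                  by intro a ha b hb; rw [List.mem_singleton] at hb; subst hb
                     exact fun h => htpre (h ▸ ha)⟩)
            hrun
          refine ⟨?_, ?_, ?_⟩
          · intro x hx
            rcases hsplit x hx with h | h
            · exact IH.1 x h
            · subst h; omega
          · rw [hrev]
            have h2 := IH.2.1
            simpa using h2
          · rw [hrev, checkB]
            rw [if_neg (fun hc => by omega)]
            rw [if_pos htM, ← PySem.Set.ofList_append_singleton]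
            exact IH.2.2
        · -- old target: success forces it to be the stack top
          cases hh : (unpopped M pre).head? with
          | none =>
            exfalso
            have := nopop n (n + 1 - (M + 1)).toNat (M + 1) t (unpopped M pre) seq res
              rfl hlast (by omega) (by rw [hh]; simp)
            rw [this] at hrun
            exact hne hrun
          | some s =>
            by_cases hst : s = t
            · subst hst
              obtain ⟨h1s, hsM, hspre, hsall⟩ := head_unpopped pre M s hh
              have hcons := unpopped_cons pre M s h1s hsM hspre hsall
              have hstep : U n seq (M + 1) (unpopped M pre) res =
                  U n seq.dropLast (M + 1) (unpopped M (pre ++ [s])) (res ++ ["-"]) := by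
                rw [hcons, U]
                split
                · rename_i hnone; rw [hlast] at hnone; cases hnone
                · rename_i t' ht'; rw [hlast] at ht'; injection ht' with ht'; subst ht'
                  rw [if_pos (by simp)]
                  simp
              rw [hstep] at hrun
              have hp : pre ≠ [] := by
                intro hp; have := hpre0 hp; omega
              have IH := ihm seq.dropLast.length hlen seq.dropLast rfl (pre ++ [s]) M
                (res ++ ["-"]) hM0 hMn
                (by intro x hx
                    rcases List.mem_append.mp hx with h | h
                    · exact hpre x h
                    · simp at h; omega)
                (fun h => absurd h (by simp))
                (by intro _; exact List.mem_append.mpr (Or.inl (hpreM hp)))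
                (by rw [List.nodup_append]
                    exact ⟨hnd, List.nodup_singleton s,
                      by intro a ha b hb; rw [List.mem_singleton] at hb; subst hb
                         exact fun h => hspre (h ▸ ha)⟩)
                hrun
              refine ⟨?_, ?_, ?_⟩
              · intro x hx
                rcases hsplit x hx with h | h
                · exact IH.1 x h
                · subst h; omega
              · rw [hrev]
                simpa using IH.2.1
              · rw [hrev, checkB]
                have hsM' : s < M := by
                  have := hpreM hp
                  have : s ≠ M := fun h => hspre (h ▸ this)
                  omega
                rw [if_neg ?_, if_neg (by omega), ← PySem.Set.ofList_append_singleton]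
                · exact IH.2.2
                · rintro ⟨-, hany⟩
                  obtain ⟨v, hvmem, hvc⟩ := List.any_eq_true.mp hany
                  rw [PySem.List.mem_pyRange_one] at hvmem
                  have : v ∈ pre := hsall v (by omega) (by omega)
                  simp [PySem.Set.mem_ofList] at hvc
                  exact hvc this
            · exfalso
              have := nopop n (n + 1 - (M + 1)).toNat (M + 1) t (unpopped M pre) seq res
                rfl hlast (by omega)
                (by rw [hh]; intro hc; injection hc with hc; exact hst hc)
              rw [this] at hrun
              exact hne hrun

-- sorted(p) == list(range(1, n+1)) names exactly "permutation of 1..n"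
theorem sorted_range_iff (p : List Int) :
    PySem.List.sorted p (fun x => x) false =
        PySem.List.pyRange 1 ((p.length : Int) + 1) 1 ↔
      p.Nodup ∧ ∀ x ∈ p, 1 ≤ x ∧ x ≤ (p.length : Int) := by
  constructor
  · intro h
    have hperm : p.Perm (PySem.List.pyRange 1 ((p.length : Int) + 1) 1) := by
      rw [← h]
      exact (PySem.List.sorted_perm p (fun x => x) false).symm
    constructor
    · exact hperm.nodup_iff.mpr (PySem.List.nodup_pyRange_one 1 _)
    · intro x hx
      have := PySem.List.mem_pyRange_one.mp (hperm.subset hx)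
      omega
  · rintro ⟨hnd, hbd⟩
    have hsub : p ⊆ PySem.List.pyRange 1 ((p.length : Int) + 1) 1 := by
      intro x hx
      have := hbd x hx
      exact PySem.List.mem_pyRange_one.mpr ⟨by omega, by omega⟩
    have hsp := hnd.subperm hsub
    have hlen : (PySem.List.pyRange 1 ((p.length : Int) + 1) 1).length ≤ p.length := by
      rw [PySem.List.length_pyRange_one]
      omega
    have hperm := hsp.perm_of_length_le hlen
    exact PySem.List.sorted_eq_of_perm_of_pairwise_lt p _ (fun x => x) hperm.symm
      (PySem.List.pairwise_lt_pyRange_one 1 _)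

theorem unpopped_zero_nil : unpopped 0 [] = [] := by
  unfold unpopped
  rw [PySem.List.pyRange_neg_one_eq_nil (le_refl 0)]
  rfl

-- ===== VERDICT (by name: the statement is the Claim_ definition above) =====
theorem solution_spec : Claim_equal_solution := by
  intro sequence _
  unfold Spec_solution solution solution_alt
  simp only [PySem.List.slice?_none_none_neg_one, Option.getD_some]
  set n : Int := (sequence.length : Int) with hn
  have hn0 : (0 : Int) ≤ n := Int.natCast_nonneg _
  have hA : (PySem.List.pyRange 1 (n + 1) 1).foldl stepA ([], [], sequence) =
      U n sequence 1 [] [] :=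
    A_eq_U n (n + 1 - 1).toNat 1 [] sequence [] rfl (by simp [hn]) (Or.inr (Or.inl rfl))
      (by omega)
  rw [hA]
  have hvalid_of_succ : (U n sequence 1 [] []).2.2 = [] →
      (PySem.List.sorted sequence.reverse (fun x => x) false =
        PySem.List.pyRange 1 (n + 1) 1 ∧
        checkB 0 PySem.Set.empty sequence.reverse = true) := by
    intro h
    have hsound := run_sound n sequence.length sequence rfl [] 0 [] (le_refl 0) hn0
      (fun x hx => absurd hx (List.not_mem_nil))
      (fun _ => rfl) (fun h => absurd rfl h) List.nodup_nil
      (by simpa [unpopped_zero_nil] using h)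
    refine ⟨?_, ?_⟩
    · have hlr : ((sequence.reverse.length : Int)) = n := by rw [List.length_reverse]
      rw [← hlr]
      apply (sorted_range_iff sequence.reverse).mpr
      refine ⟨by simpa using hsound.2.1, ?_⟩
      intro x hx
      have := hsound.1 x (List.mem_reverse.mp hx)
      rw [List.length_reverse]
      exact ⟨this.1, this.2⟩
    · simpa using hsound.2.2
  by_cases hs : PySem.List.sorted sequence.reverse (fun x => x) false =
      PySem.List.pyRange 1 (n + 1) 1
  · by_cases hc : checkB 0 PySem.Set.empty sequence.reverse = true
    · have hiff := (sorted_range_iff sequence.reverse).mp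
        (by rw [List.length_reverse]; exact hs)
      have hrun := run_success n sequence.length sequence rfl [] 0 [] (le_refl 0) hn0
        (fun x hx => absurd hx (List.not_mem_nil))
        (fun _ => rfl) (fun h => absurd rfl h)
        (by simpa using hiff.1)
        (by intro x hx
            have := hiff.2 x (List.mem_reverse.mpr hx)
            rw [List.length_reverse] at this
            exact ⟨this.1, this.2⟩)
        (by simpa using hc)
      simp only [zero_add, unpopped_zero_nil] at hrun
      rw [if_neg (by simp [hrun.1]), if_neg (by simp [hs]),
        if_neg (by intro hbad; rw [hbad] at hc; simp at hc)]
      exact hrun.2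
    · have hfail : (U n sequence 1 [] []).2.2 ≠ [] :=
        fun h => hc (hvalid_of_succ h).2
      rw [if_pos hfail, if_neg (by simp [hs]),
        if_pos (by simp [Bool.not_eq_true] at hc ⊢; exact hc)]
  · have hfail : (U n sequence 1 [] []).2.2 ≠ [] :=
      fun h => hs (hvalid_of_succ h).1
    rw [if_pos hfail, if_pos hs]
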